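-- pv_equiv track=rewrite | github.com/JasonGordonD/anna-agent | emotion_grapher.py | get_coke_streaks
-- ===== SOURCE A (Python) =====
-- def get_coke_streaks(logs):
--     streaks = []
--     streak = 0
--     for log in reversed(logs):
--         status = int(log.get("coke_status") or 0)
--         if status >= 1:
--             streak += 1
--         else:
--             streak = 0
--         streaks.append(streak)
--     return list(reversed(streaks))
-- ===== SOURCE B (Python) =====
-- def get_coke_streaks(logs):
--     # Forward run-grouping: mark each log on/off, then emit a descending
--     # countdown for each 'on' run and zeros for each 'off' run.
--     on = [int(log.get("coke_status") or 0) >= 1 for log in logs]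
--     out = []
--     i = 0
--     n = len(on)
--     while i < n:
--         j = i
--         while j < n and on[j] == on[i]:
--             j += 1
--         if on[i]:
--             out.extend(range(j - i, 0, -1))
--         else:
--             out.extend([0] * (j - i))
--         i = j
--     return out
-- ===== Notes on version B (the rewrite author's own statement) =====
-- stated objective: alternative
-- what changed: Replaces A's reversed-order streak-counter pass (append then reverse) by a forward run-grouping traversal that emits a descending countdown for each 'on' run and zeros for each 'off' run.
import Mathlib
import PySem

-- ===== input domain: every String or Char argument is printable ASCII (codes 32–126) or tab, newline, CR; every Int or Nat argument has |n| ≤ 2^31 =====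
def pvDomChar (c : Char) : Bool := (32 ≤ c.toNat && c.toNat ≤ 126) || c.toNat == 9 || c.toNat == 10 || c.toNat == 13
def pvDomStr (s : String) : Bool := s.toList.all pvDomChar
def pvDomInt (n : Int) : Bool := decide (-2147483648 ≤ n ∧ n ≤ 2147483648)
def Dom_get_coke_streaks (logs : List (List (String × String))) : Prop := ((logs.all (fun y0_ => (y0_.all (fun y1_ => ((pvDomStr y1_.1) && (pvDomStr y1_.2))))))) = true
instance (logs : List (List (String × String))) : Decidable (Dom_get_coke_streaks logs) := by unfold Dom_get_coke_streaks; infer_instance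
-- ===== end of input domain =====

-- B replaces A's reverse-walk streak counter by a forward run-grouping pass (countdown per 'on' run, zeros per 'off' run); objective: alternative decomposition.

-- ===== PORT A =====
-- int(log.get("coke_status") or 0): missing key or empty string is falsy → 0; otherwise int(s).
-- int(s) raises ValueError when PySem.Int.ofStr? s = none; Pre_ excludes those inputs, .getD 0 is unreachable inside Pre_.
def pyStatus (log : List (String × String)) : Int :=
  match log.lookup "coke_status" with
  | none => 0
  | some s => if s = "" then 0 else (PySem.Int.ofStr? s).getD 0

def get_coke_streaks (logs : List (List (String × String))) : List Int :=
  let r := logs.reverse.foldl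
    (fun (acc : List Int × Int) log =>
      let status := pyStatus log
      let streak := if status ≥ 1 then acc.2 + 1 else 0
      (acc.1 ++ [streak], streak))
    ([], 0)
  r.1.reverse

-- ===== PORT B =====
-- inner while loop scanning to the end of the current run = takeWhile/dropWhile;
-- range(L, 0, -1) = PySem.List.pyRange L 0 (-1); [0]*L = List.replicate L 0.
def segRuns : List Bool → List Int
  | [] => []
  | b :: rest =>
    let run := List.takeWhile (· == b) (b :: rest)
    let tail := List.dropWhile (· == b) (b :: rest)
    (if b then PySem.List.pyRange (run.length : Int) 0 (-1) else List.replicate run.length (0 : Int))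
      ++ segRuns tail
termination_by l => l.length
decreasing_by
  simp only [List.dropWhile_cons, BEq.rfl, if_pos]
  exact Nat.lt_succ_of_le (List.length_dropWhile_le _ _)

def get_coke_streaks_alt (logs : List (List (String × String))) : List Int :=
  segRuns (logs.map (fun log => decide (pyStatus log ≥ 1)))

-- ===== PRECONDITION & SPEC =====
-- Pre_ excludes exactly the inputs where A raises ValueError: a log whose (first) "coke_status"
-- value is a non-empty string that int() cannot parse.  B raises there too.
def Pre_get_coke_streaks (logs : List (List (String × String))) : Prop :=
  (logs.all (fun log =>
    match log.lookup "coke_status" with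
    | none => true
    | some s => s == "" || (PySem.Int.ofStr? s).isSome)) = true
instance (logs : List (List (String × String))) : Decidable (Pre_get_coke_streaks logs) := by
  unfold Pre_get_coke_streaks; infer_instance

def pvWitness_get_coke_streaks : (List (List (String × String))) :=
  [[("coke_status", "1")], [("mood", "ok")], [("coke_status", "2"), ("x", "y")], [("coke_status", "")]]

def Spec_get_coke_streaks (logs : List (List (String × String))) (out : List Int) : Prop := out = get_coke_streaks_alt logs
instance (logs : List (List (String × String))) (out : List Int) : Decidable (Spec_get_coke_streaks logs out) := by unfold Spec_get_coke_streaks; infer_instance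

-- ===== CLAIM (what is proved, stated in full; the proofs are below) =====
def Claim_equal_get_coke_streaks : Prop := ∀ (logs : List (List (String × String))), Dom_get_coke_streaks logs → Pre_get_coke_streaks logs → Spec_get_coke_streaks logs (get_coke_streaks logs)

-- ===== LEMMAS AND PROOFS =====

-- common characterisation: out[i] = if on[i] then 1 + out[i+1] else 0
def streaksSpec : List Bool → List Int
  | [] => []
  | b :: rest =>
    let t := streaksSpec rest
    (if b then t.headD 0 + 1 else 0) :: t

theorem a_foldl_eq (logs : List (List (String × String))) :
    logs.reverse.foldl
      (fun (acc : List Int × Int) log =>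
        let status := pyStatus log
        let streak := if status ≥ 1 then acc.2 + 1 else 0
        (acc.1 ++ [streak], streak))
      ([], 0)
    = ((streaksSpec (logs.map (fun log => decide (pyStatus log ≥ 1)))).reverse,
       (streaksSpec (logs.map (fun log => decide (pyStatus log ≥ 1)))).headD 0) := by
  induction logs with
  | nil => simp [streaksSpec]
  | cons x xs ih =>
    simp only [List.reverse_cons, List.foldl_append, ih, List.map_cons, streaksSpec, List.foldl_cons, List.foldl_nil]
    by_cases h : pyStatus x ≥ 1 <;> simp [h]

theorem a_eq_spec (logs : List (List (String × String))) :
    get_coke_streaks logs = streaksSpec (logs.map (fun log => decide (pyStatus log ≥ 1))) := by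
  unfold get_coke_streaks
  rw [a_foldl_eq]
  simp

theorem streaksSpec_replicate_false (L : ℕ) (d : List Bool) :
    streaksSpec (List.replicate L false ++ d) = List.replicate L (0 : Int) ++ streaksSpec d := by
  induction L with
  | zero => simp
  | succ n ih => simp [List.replicate_succ, streaksSpec, ih]

theorem streaksSpec_replicate_true (L : ℕ) (d : List Bool)
    (hd : (streaksSpec d).headD 0 = 0) :
    streaksSpec (List.replicate L true ++ d)
      = PySem.List.pyRange (L : Int) 0 (-1) ++ streaksSpec d
    ∧ (streaksSpec (List.replicate L true ++ d)).headD 0 = (L : Int) := by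
  induction L with
  | zero =>
    constructor
    · simp [PySem.List.pyRange_neg_one_eq_nil (le_refl (0 : Int))]
    · simpa using hd
  | succ n ih =>
    have hcons : PySem.List.pyRange ((n + 1 : ℕ) : Int) 0 (-1)
        = ((n + 1 : ℕ) : Int) :: PySem.List.pyRange ((n : ℕ) : Int) 0 (-1) := by
      have := PySem.List.pyRange_neg_one_cons (a := ((n + 1 : ℕ) : Int)) (b := 0) (by positivity)
      simpa [show ((n + 1 : ℕ) : Int) - 1 = ((n : ℕ) : Int) by push_cast; ring] using this
    have hs : streaksSpec (List.replicate (n + 1) true ++ d)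
        = ((streaksSpec (List.replicate n true ++ d)).headD 0 + 1)
            :: streaksSpec (List.replicate n true ++ d) := by
      rw [List.replicate_succ, List.cons_append]
      rfl
    constructor
    · rw [hs, ih.2, ih.1, hcons, Nat.cast_succ, List.cons_append]
    · rw [hs, ih.2, List.headD_cons, Nat.cast_succ]

theorem takeWhile_eq_replicate (b : Bool) (l : List Bool) :
    List.takeWhile (· == b) l = List.replicate (List.takeWhile (· == b) l).length b := by
  apply List.eq_replicate_of_mem
  intro x hx
  have := List.mem_takeWhile_imp hx
  exact eq_of_beq this

theorem headD_streaksSpec_dropWhile_true (l : List Bool) :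
    (streaksSpec (List.dropWhile (· == true) l)).headD 0 = 0 := by
  induction l with
  | nil => rfl
  | cons x xs ih =>
    cases x
    · rfl
    · show (streaksSpec (List.dropWhile (· == true) xs)).headD 0 = 0
      exact ih

theorem segRuns_eq_spec (l : List Bool) : segRuns l = streaksSpec l := by
  induction hn : l.length using Nat.strong_induction_on generalizing l with
  | _ n ih =>
  cases l with
  | nil => simp [segRuns, streaksSpec]
  | cons b rest =>
    have hsplit : List.takeWhile (· == b) (b :: rest) ++ List.dropWhile (· == b) (b :: rest) = b :: rest :=
      List.takeWhile_append_dropWhile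
    have hlen : (List.dropWhile (· == b) (b :: rest)).length < n := by
      subst hn
      simp only [List.dropWhile_cons, BEq.rfl, if_pos]
      exact Nat.lt_succ_of_le (List.length_dropWhile_le _ _)
    have ihtail : segRuns (List.dropWhile (· == b) (b :: rest))
        = streaksSpec (List.dropWhile (· == b) (b :: rest)) :=
      ih _ hlen _ rfl
    rw [segRuns, ihtail]
    cases b with
    | false =>
      conv_rhs => rw [← hsplit, takeWhile_eq_replicate false (false :: rest)]
      rw [streaksSpec_replicate_false]
      simp
    | true =>
      conv_rhs => rw [← hsplit, takeWhile_eq_replicate true (true :: rest)]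
      rw [(streaksSpec_replicate_true _ _ (headD_streaksSpec_dropWhile_true (true :: rest))).1]
      simp

-- ===== VERDICT (by name: the statement is the Claim_ definition above) =====
theorem get_coke_streaks_spec : Claim_equal_get_coke_streaks := by
  intro logs _ _
  unfold Spec_get_coke_streaks get_coke_streaks_alt
  rw [a_eq_spec, segRuns_eq_spec]
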